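-- pv_equiv track=rewrite | github.com/vrnprkh/aoc2025 | d08/main.py | part1
-- ===== SOURCE A (Python) =====
-- import math
--
-- def parseInput(data : str):
-- 	lines = data.split("\n")
-- 	return [tuple([int(e) for e in line.split(",")]) for line in lines]
--
-- def dist2(p1, p2):
-- 	x1,y1,z1 = p1
-- 	x2,y2,z2 = p2
-- 	return (x1-x2)**2 + (y1-y2)**2 + (z1-z2)**2
--
-- def part1(data : str, size = 10):
-- 	p = parseInput(data)
-- 	conns = []
-- 	for i in range(len(p)):
-- 		for j in range(i + 1, len(p)):
-- 			conns.append([dist2(p[i], p[j]), p[i], p[j]])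
--
-- 	conns.sort()
-- 	networks = []
--
-- 	for conn in conns[:size]:
-- 		inNetworks = []
-- 		for network in networks:
-- 			if conn[1] in network or conn[2] in network:
-- 				inNetworks.append(network)
--
-- 		if len(inNetworks) == 0:
-- 			networks.append({conn[1], conn[2]})
-- 		elif len(inNetworks) == 1:
-- 			inNetworks[0].add(conn[1])
-- 			inNetworks[0].add(conn[2])
-- 		else:
-- 			networks.remove(inNetworks[1])
-- 			inNetworks[0].update(inNetworks[1])
-- 	return math.prod(sorted([len(n) for n in networks])[-3:])
-- ===== SOURCE B (Python) =====
-- import math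
--
-- def parseInput(data : str):
-- 	lines = data.split("\n")
-- 	return [tuple([int(e) for e in line.split(",")]) for line in lines]
--
-- def dist2(p1, p2):
-- 	x1,y1,z1 = p1
-- 	x2,y2,z2 = p2
-- 	return (x1-x2)**2 + (y1-y2)**2 + (z1-z2)**2
--
-- def part1(data : str, size = 10):
-- 	p = parseInput(data)
-- 	conns = []
-- 	for i in range(len(p)):
-- 		for j in range(i + 1, len(p)):
-- 			conns.append([dist2(p[i], p[j]), p[i], p[j]])
-- 	conns.sort()
-- 	# dict-indexed components instead of a list of sets scanned per edge:
-- 	# label maps a point to its component id, members maps id -> set of points.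
-- 	label = {}
-- 	members = {}
-- 	nxt = 0
-- 	for _, u, v in conns[:size]:
-- 		a = label.get(u)
-- 		b = label.get(v)
-- 		if a is None and b is None:
-- 			members[nxt] = {u, v}
-- 			label[u] = nxt
-- 			label[v] = nxt
-- 			nxt += 1
-- 		elif a is None or b is None or a == b:
-- 			k = a if a is not None else b
-- 			members[k].add(u)
-- 			members[k].add(v)
-- 			label[u] = k
-- 			label[v] = k
-- 		else:
-- 			k, m = (a, b) if a < b else (b, a)
-- 			members[k].update(members[m])
-- 			for q in members[m]:
-- 				label[q] = k
-- 			del members[m]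
-- 	return math.prod(sorted(len(s) for s in members.values())[-3:])
-- ===== Notes on version B (the rewrite author's own statement) =====
-- stated objective: alternative
-- what changed: The per-edge membership scan over the list of network sets is replaced by dict-indexed components (point->id, id->set of points), so each edge is handled by two hash lookups and a keyed merge instead of scanning every network; parsing, edge construction, sort and slice are unchanged.
import Mathlib
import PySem

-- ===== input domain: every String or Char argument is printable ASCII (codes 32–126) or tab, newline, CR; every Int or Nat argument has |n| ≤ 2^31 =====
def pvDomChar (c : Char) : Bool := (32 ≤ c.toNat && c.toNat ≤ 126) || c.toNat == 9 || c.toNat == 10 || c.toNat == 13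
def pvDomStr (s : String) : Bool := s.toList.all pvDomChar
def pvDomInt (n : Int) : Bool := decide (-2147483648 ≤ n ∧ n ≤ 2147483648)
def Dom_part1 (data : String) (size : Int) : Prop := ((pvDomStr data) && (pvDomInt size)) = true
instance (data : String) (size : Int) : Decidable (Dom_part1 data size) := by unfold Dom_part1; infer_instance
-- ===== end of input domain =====

-- B replaces A's per-edge scan over the list of network sets by dict-indexed components
-- (point -> id, id -> set); parsing, edge building, sort, slice and the final product are unchanged.

-- ===== PORT A =====
-- shared helpers: parseInput, dist2, the conns double loop, conns.sort(), conns[:size] and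
-- math.prod(sorted(...)[-3:]) are literally the same Python lines in A and in B.
abbrev Pt := List Int
abbrev Net := PySem.Set Pt

-- parseInput; int(e) raises ValueError on a bad field (excluded by Pre_; the .getD 0 is unreachable there);
-- split? is `some` since both separators are nonempty.
def parseInputP (data : String) : List Pt :=
  ((PySem.Str.split? data "\n").getD []).map (fun line =>
    ((PySem.Str.split? line ",").getD []).map (fun e => (PySem.Int.ofStr? e).getD 0))

-- dist2; Python's x1,y1,z1 = p1 raises unless len(p1)=3 (excluded by Pre_ whenever dist2 is reached;
-- the .getD 0 defaults are unreachable there).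
def dist2P (p1 p2 : Pt) : Int :=
  let x1 := p1.getD 0 0; let y1 := p1.getD 1 0; let z1 := p1.getD 2 0
  let x2 := p2.getD 0 0; let y2 := p2.getD 1 0; let z2 := p2.getD 2 0
  (x1 - x2) ^ 2 + (y1 - y2) ^ 2 + (z1 - z2) ^ 2

-- the double loop appending [dist2(p[i],p[j]), p[i], p[j]]
def connsOf (p : List Pt) : List (Int × Pt × Pt) :=
  (PySem.List.pyRange 0 p.length 1).foldl (fun conns i =>
    (PySem.List.pyRange (i + 1) p.length 1).foldl (fun cs j =>
      cs ++ [(dist2P (PySem.List.pyGetD p i []) (PySem.List.pyGetD p j []),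
              PySem.List.pyGetD p i [], PySem.List.pyGetD p j [])]) conns) []

-- Python compares the lists [d, p1, p2] lexicographically (ints, then tuples lexicographically):
-- exactly the Lex order on Int × Lex (List Int × List Int).
def connKey (c : Int × Pt × Pt) : Lex (Int × Lex (Pt × Pt)) := toLex (c.1, toLex c.2)

-- conns.sort(); conns[:size]
def pickedConns (data : String) (size : Int) : List (Int × Pt × Pt) :=
  PySem.List.slice (PySem.List.sorted (connsOf (parseInputP data)) connKey false) none (some size)

-- math.prod(sorted(sizes)[-3:])
def prodTop3 (sizes : List Int) : Int :=
  (PySem.List.slice (PySem.List.sorted sizes (fun x => x) false) (some (-3)) none).foldl (· * ·) 1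

def netMatch (u v : Pt) (n : Net) : Bool := n.contains u || n.contains v

-- in-place mutation of the first network containing u or v (inNetworks[0])
def updFirst (u v : Pt) (f : Net → Net) : List Net → List Net
  | [] => []
  | n :: t => if netMatch u v n then f n :: t else n :: updFirst u v f t

-- networks.remove(x): drop the first element == x (set equality); ValueError (absent) is unreachable
-- since inNetworks[1] ∈ networks, so the [] case returning [] is never observed.
def removeSetEq (n1 : Net) : List Net → List Net
  | [] => []
  | n :: t => if PySem.Set.equal n n1 then t else n :: removeSetEq n1 t

def stepA (networks : List Net) (conn : Int × Pt × Pt) : List Net :=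
  let u := conn.2.1
  let v := conn.2.2
  let inNetworks := networks.filter (netMatch u v)
  if inNetworks.length == 0 then
    networks ++ [PySem.Set.add (PySem.Set.add PySem.Set.empty u) v]
  else if inNetworks.length == 1 then
    updFirst u v (fun n => PySem.Set.add (PySem.Set.add n u) v) networks
  else
    let n1 := PySem.List.pyGetD inNetworks 1 PySem.Set.empty
    updFirst u v (fun n => PySem.Set.update n n1) (removeSetEq n1 networks)

def part1 (data : String) (size : Int) : Int :=
  let networks := (pickedConns data size).foldl stepA []
  prodTop3 (networks.map PySem.Set.len)

-- ===== PORT B =====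
abbrev BSt := PySem.Dict Pt Int × PySem.Dict Int Net × Int

-- the `a is None or b is None or a == b` branch: members[k].add(u); members[k].add(v); label[u]=k; label[v]=k
def joinAt (label : PySem.Dict Pt Int) (members : PySem.Dict Int Net) (nxt : Int)
    (u v : Pt) (k : Int) : BSt :=
  ((label.insert u k).insert v k,
   members.modify k PySem.Set.empty (fun s => PySem.Set.add (PySem.Set.add s u) v),
   nxt)

-- the merge branch: members[k].update(members[m]); relabel members[m]; del members[m]
def mergeAt (label : PySem.Dict Pt Int) (members : PySem.Dict Int Net) (nxt : Int)
    (k m : Int) : BSt :=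
  let sm := (members.get? m).getD PySem.Set.empty
  (sm.foldl (fun lb q => lb.insert q k) label,
   (members.modify k PySem.Set.empty (fun s => PySem.Set.update s sm)).erase m,
   nxt)

def stepB (st : BSt) (conn : Int × Pt × Pt) : BSt :=
  let label := st.1
  let members := st.2.1
  let nxt := st.2.2
  let u := conn.2.1
  let v := conn.2.2
  match label.get? u, label.get? v with
  | none, none =>
      ((label.insert u nxt).insert v nxt,
       members.insert nxt (PySem.Set.add (PySem.Set.add PySem.Set.empty u) v),
       nxt + 1)
  | some a, none => joinAt label members nxt u v a
  | none, some b => joinAt label members nxt u v b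
  | some a, some b =>
      if a = b then joinAt label members nxt u v a
      else mergeAt label members nxt (min a b) (max a b)

def part1_alt (data : String) (size : Int) : Int :=
  let st := (pickedConns data size).foldl stepB (PySem.Dict.empty, PySem.Dict.empty, 0)
  prodTop3 (st.2.1.values.map PySem.Set.len)

-- ===== PRECONDITION & SPEC =====
-- Pre_ excludes exactly the inputs where A raises: a field int() cannot parse (ValueError), or — when
-- there are at least two lines, so dist2's 3-tuple unpacking is actually reached — a line without
-- exactly 3 comma-separated fields (ValueError in dist2).
def Pre_part1 (data : String) (size : Int) : Prop :=
  (∀ line ∈ (PySem.Str.split? data "\n").getD [],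
    ∀ e ∈ (PySem.Str.split? line ",").getD [], PySem.Int.ofStr? e ≠ none) ∧
  (2 ≤ ((PySem.Str.split? data "\n").getD []).length →
    ∀ line ∈ (PySem.Str.split? data "\n").getD [],
      ((PySem.Str.split? line ",").getD []).length = 3)
instance (data : String) (size : Int) : Decidable (Pre_part1 data size) := by
  unfold Pre_part1; infer_instance

def pvWitness_part1 : String × Int := ("1,2,3\n4,5,6\n7,8,100", 10)

def Spec_part1 (data : String) (size : Int) (out : Int) : Prop := out = part1_alt data size
instance (data : String) (size : Int) (out : Int) : Decidable (Spec_part1 data size out) := by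
  unfold Spec_part1; infer_instance

-- ===== CLAIM (what is proved, stated in full; the proofs are below) =====
def Claim_equal_part1 : Prop := ∀ (data : String) (size : Int), Dom_part1 data size → Pre_part1 data size → Spec_part1 data size (part1 data size)

-- ===== LEMMAS AND PROOFS =====

-- overwrite-in-place of the (unique) entry with key k, exactly insert's map on a present key
def setAt (k : Int) (w : Net) (items : List (Int × Net)) : List (Int × Net) :=
  items.map (fun p => if (p.1 == k) = true then (k, w) else p)

-- label coherence: label.get? q = some k iff q lies in the member set keyed k
def Coh (label : PySem.Dict Pt Int) (items : List (Int × Net)) : Prop :=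
  ∀ q k, label.get? q = some k ↔ ∃ s, (k, s) ∈ items ∧ q ∈ s

def InvAB (networks : List Net) (st : BSt) : Prop :=
  st.2.1.items.map Prod.snd = networks ∧
  (st.2.1.items.map Prod.fst).Pairwise (· < ·) ∧
  (∀ kv ∈ st.2.1.items, kv.1 < st.2.2) ∧
  Coh st.1 st.2.1.items

theorem keyfun {items : List (Int × Net)} (hnd : (items.map Prod.fst).Nodup)
    {k : Int} {s s' : Net} (h1 : (k, s) ∈ items) (h2 : (k, s') ∈ items) : s = s' := by
  induction items with
  | nil => cases h1
  | cons a t ih =>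
    simp only [List.map_cons, List.nodup_cons] at hnd
    rcases List.mem_cons.mp h1 with h1 | h1 <;> rcases List.mem_cons.mp h2 with h2 | h2
    · rw [← h1] at h2; exact (Prod.mk.injEq _ _ _ _ ▸ h2.symm).2
    · exfalso; exact hnd.1 (h1 ▸ List.mem_map.mpr ⟨(k, s'), h2, rfl⟩)
    · exfalso; exact hnd.1 (h2 ▸ List.mem_map.mpr ⟨(k, s), h1, rfl⟩)
    · exact ih hnd.2 h1 h2

theorem find?_of_mem {items : List (Int × Net)} (hnd : (items.map Prod.fst).Nodup)
    {k : Int} {s : Net} (h : (k, s) ∈ items) :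
    items.find? (fun p => p.1 == k) = some (k, s) := by
  induction items with
  | nil => cases h
  | cons a t ih =>
    simp only [List.map_cons, List.nodup_cons] at hnd
    rcases List.mem_cons.mp h with h | h
    · rw [← h]; simp [List.find?]
    · have hne : (a.1 == k) = false := by
        refine beq_eq_false_iff_ne.mpr ?_
        intro hk
        exact hnd.1 (hk ▸ List.mem_map.mpr ⟨(k, s), h, rfl⟩)
      simp [List.find?, hne, ih hnd.2 h]

theorem mem_iff_label {label : PySem.Dict Pt Int} {items : List (Int × Net)}
    (hc : Coh label items) (hnd : (items.map Prod.fst).Nodup)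
    {k : Int} {s : Net} (h : (k, s) ∈ items) (q : Pt) :
    q ∈ s ↔ label.get? q = some k := by
  constructor
  · intro hq
    exact (hc q k).mpr ⟨s, h, hq⟩
  · intro hq
    rcases (hc q k).mp hq with ⟨s', hs', hqs'⟩
    exact (keyfun hnd h hs') ▸ hqs' 

theorem filter_single {items : List (Int × Net)} (hnd : (items.map Prod.fst).Nodup)
    {k : Int} {s : Net} (h : (k, s) ∈ items) {p : Int × Net → Bool}
    (hp : ∀ kv ∈ items, p kv = (kv.1 == k)) : items.filter p = [(k, s)] := by
  induction items with
  | nil => cases h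
  | cons a t ih =>
    simp only [List.map_cons, List.nodup_cons] at hnd
    rcases List.mem_cons.mp h with h | h
    · have hp1 : p a = true := by rw [hp a (List.mem_cons_self), ← h]; simp
      have ht : t.filter p = [] := by
        rw [List.filter_eq_nil_iff]
        intro kv hkv
        rw [hp kv (List.mem_cons_of_mem _ hkv)]
        simp only [beq_iff_eq]
        intro hk
        exact hnd.1 (h ▸ hk ▸ List.mem_map.mpr ⟨kv, hkv, rfl⟩)
      rw [List.filter_cons_of_pos hp1, ht, ← h]
    · have hp1 : p a = false := by
        rw [hp a (List.mem_cons_self), beq_eq_false_iff_ne]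
        intro hk
        exact hnd.1 (hk ▸ List.mem_map.mpr ⟨(k, s), h, rfl⟩)
      rw [List.filter_cons_of_neg (by simp [hp1])]
      exact ih hnd.2 h (fun kv hkv => hp kv (List.mem_cons_of_mem _ hkv))

theorem setAt_absent {items : List (Int × Net)} {k : Int}
    (h : ∀ kv ∈ items, kv.1 ≠ k) (w : Net) : setAt k w items = items := by
  unfold setAt
  have hid : ∀ kv ∈ items, (if (kv.1 == k) = true then (k, w) else kv) = id kv := by
    intro kv hkv; simp [h kv hkv]
  rw [List.map_congr_left hid, List.map_id]

theorem nodup_of_sorted {items : List (Int × Net)}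
    (hso : (items.map Prod.fst).Pairwise (· < ·)) : (items.map Prod.fst).Nodup :=
  hso.imp (fun h => ne_of_lt h)

theorem filter_pair {items : List (Int × Net)} (hso : (items.map Prod.fst).Pairwise (· < ·))
    {k m : Int} {sk sm : Net} (hk : (k, sk) ∈ items) (hm : (m, sm) ∈ items) (hkm : k < m)
    {p : Int × Net → Bool} (hp : ∀ kv ∈ items, p kv = (kv.1 == k || kv.1 == m)) :
    items.filter p = [(k, sk), (m, sm)] := by
  induction items with
  | nil => cases hk
  | cons a t ih =>
    simp only [List.map_cons, List.pairwise_cons] at hso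
    by_cases ha : a.1 = k
    · have hax : a = (k, sk) := by
        rcases List.mem_cons.mp hk with h' | h'
        · exact h'.symm
        · exfalso
          have := hso.1 _ (List.mem_map.mpr ⟨(k, sk), h', rfl⟩)
          omega
      have hmt : (m, sm) ∈ t := by
        rcases List.mem_cons.mp hm with h' | h'
        · exfalso; rw [← h'] at ha; simp at ha; omega
        · exact h'
      have hpa : p a = true := by rw [hp a List.mem_cons_self, hax]; simp
      have hft : t.filter p = [(m, sm)] := by
        refine filter_single (nodup_of_sorted hso.2) hmt ?_
        intro kv hkv
        have hgt : a.1 < kv.1 := hso.1 _ (List.mem_map.mpr ⟨kv, hkv, rfl⟩)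
        have hkvk : (kv.1 == k) = false := by simp only [beq_eq_false_iff_ne]; omega
        rw [hp kv (List.mem_cons_of_mem _ hkv), hkvk, Bool.false_or]
      rw [List.filter_cons_of_pos hpa, hft, hax]
    · have hkt : (k, sk) ∈ t := by
        rcases List.mem_cons.mp hk with h' | h'
        · exfalso; rw [← h'] at ha; simp at ha
        · exact h'
      have ham : a.1 ≠ m := by
        intro h'
        have := hso.1 _ (List.mem_map.mpr ⟨(k, sk), hkt, rfl⟩)
        omega
      have hmt : (m, sm) ∈ t := by
        rcases List.mem_cons.mp hm with h' | h'
        · exfalso; rw [← h'] at ham; simp at ham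
        · exact h'
      have hpa : p a = false := by
        rw [hp a List.mem_cons_self]
        simp [ha, ham]
      rw [List.filter_cons_of_neg (by simp [hpa])]
      exact ih hso.2 hkt hmt (fun kv hkv => hp kv (List.mem_cons_of_mem _ hkv))

theorem updFirst_setAt {items : List (Int × Net)} (hnd : (items.map Prod.fst).Nodup)
    {k : Int} {sk : Net} (h : (k, sk) ∈ items) {u v : Pt} {f : Net → Net}
    (hmatch : ∀ kv ∈ items, netMatch u v kv.2 = (kv.1 == k)) :
    updFirst u v f (items.map Prod.snd) = (setAt k (f sk) items).map Prod.snd := by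
  induction items with
  | nil => cases h
  | cons a t ih =>
    simp only [List.map_cons, List.nodup_cons] at hnd
    simp only [List.map_cons, updFirst]
    by_cases hm : netMatch u v a.2 = true
    · have hak : (a.1 == k) = true := by rw [← hmatch a List.mem_cons_self, hm]
      have hak' : a.1 = k := by simpa using hak
      have ha : (a.1, a.2) ∈ a :: t := by simp
      have has : a.2 = sk := keyfun (by simp only [List.map_cons, List.nodup_cons]; exact hnd) (hak' ▸ ha) h
      have htk : ∀ kv ∈ t, kv.1 ≠ k := by
        intro kv hkv hkk
        exact hnd.1 (hak' ▸ hkk ▸ List.mem_map.mpr ⟨kv, hkv, rfl⟩)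
      simp only [hm, if_true]
      unfold setAt
      simp only [List.map_cons, hak, if_true]
      rw [show (List.map (fun p => if (p.1 == k) = true then (k, f sk) else p) t) = t from setAt_absent htk _]
      simp [has]
    · have hak : (a.1 == k) = false := by
        have h1 := hmatch a List.mem_cons_self
        simp only [Bool.not_eq_true] at hm
        rw [hm] at h1; exact h1.symm
      have hat : (k, sk) ∈ t := by
        rcases List.mem_cons.mp h with h' | h'
        · exfalso; rw [← h'] at hak; simp at hak
        · exact h'
      simp only [hm]
      unfold setAt
      simp only [List.map_cons, hak]
      rw [show updFirst u v f (List.map Prod.snd t) = (setAt k (f sk) t).map Prod.snd from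
        ih hnd.2 hat (fun kv hkv => hmatch kv (List.mem_cons_of_mem _ hkv))]
      rfl

theorem removeSetEq_erase {items : List (Int × Net)} (hnd : (items.map Prod.fst).Nodup)
    {m : Int} {sm : Net} (h : (m, sm) ∈ items)
    (heq : ∀ kv ∈ items, PySem.Set.equal kv.2 sm = true → kv.1 = m) :
    removeSetEq sm (items.map Prod.snd) = (items.filter (fun p => !(p.1 == m))).map Prod.snd := by
  induction items with
  | nil => rfl
  | cons a t ih =>
    simp only [List.map_cons, List.nodup_cons] at hnd
    simp only [List.map_cons, removeSetEq]
    by_cases ham : a.1 = m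
    · have ha : (a.1, a.2) ∈ a :: t := by simp
      have has : a.2 = sm := keyfun (by simp only [List.map_cons, List.nodup_cons]; exact hnd) (ham ▸ ha) h
      have hrefl : PySem.Set.equal a.2 sm = true := by
        rw [has]; exact (PySem.Set.equal_iff sm sm).mpr (fun x => Iff.rfl)
      have htm : ∀ kv ∈ t, kv.1 ≠ m := by
        intro kv hkv hkk
        exact hnd.1 (ham ▸ hkk ▸ List.mem_map.mpr ⟨kv, hkv, rfl⟩)
      have hfil : t.filter (fun p => !(p.1 == m)) = t := by
        rw [List.filter_eq_self]
        intro kv hkv; simp [htm kv hkv]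
      simp [hrefl, ham, hfil]
    · have hne : PySem.Set.equal a.2 sm = false := by
        by_contra hcon
        simp only [Bool.not_eq_false] at hcon
        exact ham (heq a List.mem_cons_self hcon)
      have hat : (m, sm) ∈ t := by
        rcases List.mem_cons.mp h with h' | h'
        · exfalso; rw [← h'] at ham; simp at ham
        · exact h'
      have hrec := ih hnd.2 hat (fun kv hkv hkeq => heq kv (List.mem_cons_of_mem _ hkv) hkeq)
      simp [hne, show (a.1 == m) = false by simpa using ham, hrec]

theorem mem_setAt {items : List (Int × Net)}
    {k : Int} {sk : Net} (h : (k, sk) ∈ items) (w : Net) (k' : Int) (s' : Net) :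
    ((k', s') ∈ setAt k w items) ↔ (k' = k ∧ s' = w) ∨ ((k', s') ∈ items ∧ k' ≠ k) := by
  unfold setAt
  rw [List.mem_map]
  constructor
  · rintro ⟨kv, hkv, hg⟩
    by_cases hkk : (kv.1 == k) = true
    · rw [if_pos hkk] at hg
      left; exact ⟨(congrArg Prod.fst hg).symm, (congrArg Prod.snd hg).symm⟩
    · rw [if_neg hkk] at hg
      subst hg
      right
      exact ⟨hkv, by simpa using hkk⟩
  · rintro (⟨hk', hs'⟩ | ⟨hmem, hk'⟩)
    · exact ⟨(k, sk), h, by simp [hk', hs']⟩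
    · exact ⟨(k', s'), hmem, by simp [hk']⟩

theorem keys_setAt (k : Int) (w : Net) (items : List (Int × Net)) :
    (setAt k w items).map Prod.fst = items.map Prod.fst := by
  unfold setAt
  rw [List.map_map]
  apply List.map_congr_left
  intro kv _
  by_cases hkk : (kv.1 == k) = true
  · have hk' : kv.1 = k := by simpa using hkk
    simp [Function.comp, hk']
  · simp [Function.comp, hkk]

theorem get?_foldl_insert (k : Int) (xs : List Pt) (lb : PySem.Dict Pt Int) (x : Pt) :
    (xs.foldl (fun lb q => lb.insert q k) lb).get? x =
      if x ∈ xs then some k else lb.get? x := by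
  induction xs generalizing lb with
  | nil => simp
  | cons q t ih =>
    simp only [List.foldl_cons, ih, List.mem_cons]
    by_cases hxt : x ∈ t
    · simp [hxt]
    · by_cases hxq : x = q
      · simp [hxq, PySem.Dict.get?_insert_self]
      · simp [hxt, hxq, PySem.Dict.get?_insert_of_ne _ _ hxq]

theorem netMatch_iff (u v : Pt) (s : Net) : netMatch u v s = true ↔ u ∈ s ∨ v ∈ s := by
  simp [netMatch, PySem.Set.contains]

theorem mem_pair (u v q : Pt) :
    q ∈ PySem.Set.add (PySem.Set.add PySem.Set.empty u) v ↔ q = u ∨ q = v := by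
  simp [PySem.Set.mem_add, PySem.Set.empty]

theorem contains_of_mem {d : PySem.Dict Int Net} {k : Int} {sk : Net}
    (h : (k, sk) ∈ d.items) : d.contains k = true := by
  simp only [PySem.Dict.contains, List.any_eq_true]
  exact ⟨(k, sk), h, by simp⟩

theorem items_insert_fresh (d : PySem.Dict Int Net) (k : Int) (w : Net)
    (h : ∀ kv ∈ d.items, kv.1 ≠ k) : (d.insert k w).items = d.items ++ [(k, w)] := by
  rw [PySem.Dict.items_insert, if_neg]
  simp only [PySem.Dict.contains, List.any_eq_true]
  rintro ⟨kv, hkv, hk⟩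
  exact h kv hkv (by simpa using hk)

theorem items_modify_present {d : PySem.Dict Int Net} {k : Int} {sk : Net}
    (hnd : (d.items.map Prod.fst).Nodup) (h : (k, sk) ∈ d.items) (d0 : Net) (f : Net → Net) :
    (d.modify k d0 f).items = setAt k (f sk) d.items := by
  have hgd : d.getD k d0 = sk := by
    simp [PySem.Dict.getD, PySem.Dict.get?, find?_of_mem hnd h]
  rw [PySem.Dict.modify, hgd, PySem.Dict.items_insert, if_pos (contains_of_mem h)]
  rfl

theorem items_erase (d : PySem.Dict Int Net) (k : Int) :
    (d.erase k).items = d.items.filter (fun p => !(p.1 == k)) := rfl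

theorem setAt_filter_comm (k m : Int) (w : Net) (items : List (Int × Net)) :
    (setAt k w items).filter (fun p => !(p.1 == m)) =
      setAt k w (items.filter (fun p => !(p.1 == m))) := by
  unfold setAt
  rw [List.filter_map]
  congr 1
  apply List.filter_congr
  intro kv _
  by_cases hkk : (kv.1 == k) = true
  · have : kv.1 = k := by simpa using hkk
    simp [Function.comp, this]
  · simp [Function.comp, hkk]

theorem stepA_zero {networks : List Net} {conn : Int × Pt × Pt}
    (h : networks.filter (netMatch conn.2.1 conn.2.2) = []) :
    stepA networks conn =
      networks ++ [PySem.Set.add (PySem.Set.add PySem.Set.empty conn.2.1) conn.2.2] := by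
  simp [stepA, h]

theorem stepA_one {networks : List Net} {conn : Int × Pt × Pt} {sk : Net}
    (h : networks.filter (netMatch conn.2.1 conn.2.2) = [sk]) :
    stepA networks conn =
      updFirst conn.2.1 conn.2.2
        (fun n => PySem.Set.add (PySem.Set.add n conn.2.1) conn.2.2) networks := by
  simp [stepA, h]

theorem stepA_two {networks : List Net} {conn : Int × Pt × Pt} {sk sm : Net}
    (h : networks.filter (netMatch conn.2.1 conn.2.2) = [sk, sm]) :
    stepA networks conn =
      updFirst conn.2.1 conn.2.2 (fun n => PySem.Set.update n sm)
        (removeSetEq sm networks) := by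
  simp only [stepA, h]
  norm_num
  rfl

theorem coh_new {label : PySem.Dict Pt Int} {items : List (Int × Net)} {nxt : Int} {u v : Pt}
    (hcoh : Coh label items)
    (hgu : label.get? u = none) (hgv : label.get? v = none) :
    Coh ((label.insert u nxt).insert v nxt)
      (items ++ [(nxt, PySem.Set.add (PySem.Set.add PySem.Set.empty u) v)]) := by
  intro q k
  have hrhs : (∃ s, (k, s) ∈ items ++ [(nxt, PySem.Set.add (PySem.Set.add PySem.Set.empty u) v)] ∧ q ∈ s)
      ↔ (∃ s, (k, s) ∈ items ∧ q ∈ s) ∨ (k = nxt ∧ (q = u ∨ q = v)) := by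
    constructor
    · rintro ⟨s, hs, hq⟩
      rcases List.mem_append.mp hs with hs | hs
      · exact Or.inl ⟨s, hs, hq⟩
      · simp only [List.mem_singleton] at hs
        right
        refine ⟨(congrArg Prod.fst hs), ?_⟩
        rw [show s = PySem.Set.add (PySem.Set.add PySem.Set.empty u) v from congrArg Prod.snd hs] at hq
        exact (mem_pair u v q).mp hq
    · rintro (⟨s, hs, hq⟩ | ⟨hk, hq⟩)
      · exact ⟨s, List.mem_append.mpr (Or.inl hs), hq⟩
      · exact ⟨_, List.mem_append.mpr (Or.inr (by simp [hk])), (mem_pair u v q).mpr hq⟩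
  rw [hrhs]
  by_cases hqv : q = v
  · subst hqv
    rw [PySem.Dict.get?_insert_self]
    constructor
    · intro h
      exact Or.inr ⟨by injection h with h; exact h.symm, Or.inr rfl⟩
    · rintro (⟨s, hs, hq⟩ | ⟨hk, _⟩)
      · exact absurd ((hcoh q k).mpr ⟨s, hs, hq⟩) (by simp [hgv])
      · rw [hk]
  · rw [PySem.Dict.get?_insert_of_ne _ _ hqv]
    by_cases hqu : q = u
    · subst hqu
      rw [PySem.Dict.get?_insert_self]
      constructor
      · intro h
        exact Or.inr ⟨by injection h with h; exact h.symm, Or.inl rfl⟩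
      · rintro (⟨s, hs, hq⟩ | ⟨hk, _⟩)
        · exact absurd ((hcoh q k).mpr ⟨s, hs, hq⟩) (by simp [hgu])
        · rw [hk]
    · rw [PySem.Dict.get?_insert_of_ne _ _ hqu]
      rw [hcoh q k]
      constructor
      · exact Or.inl
      · rintro (h | ⟨_, h | h⟩)
        · exact h
        · exact absurd h hqu
        · exact absurd h hqv

theorem coh_join {label : PySem.Dict Pt Int} {items : List (Int × Net)} {u v : Pt} {k : Int} {sk : Net}
    (hcoh : Coh label items) (hnd : (items.map Prod.fst).Nodup) (hksk : (k, sk) ∈ items)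
    (hgu : label.get? u = none ∨ label.get? u = some k)
    (hgv : label.get? v = none ∨ label.get? v = some k) :
    Coh ((label.insert u k).insert v k)
      (setAt k (PySem.Set.add (PySem.Set.add sk u) v) items) := by
  intro q k'
  rw [show (∃ s, (k', s) ∈ setAt k (PySem.Set.add (PySem.Set.add sk u) v) items ∧ q ∈ s) ↔
      (k' = k ∧ q ∈ PySem.Set.add (PySem.Set.add sk u) v) ∨ (∃ s, (k', s) ∈ items ∧ q ∈ s ∧ k' ≠ k) from by
    constructor
    · rintro ⟨s, hs, hq⟩
      rcases (mem_setAt hksk _ _ _).mp hs with ⟨h1, h2⟩ | ⟨h1, h2⟩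
      · exact Or.inl ⟨h1, h2 ▸ hq⟩
      · exact Or.inr ⟨s, h1, hq, h2⟩
    · rintro (⟨h1, h2⟩ | ⟨s, h1, h2, h3⟩)
      · exact ⟨_, (mem_setAt hksk _ _ _).mpr (Or.inl ⟨h1, rfl⟩), h2⟩
      · exact ⟨s, (mem_setAt hksk _ _ _).mpr (Or.inr ⟨h1, h3⟩), h2⟩]
  have hmem : ∀ x, x ∈ PySem.Set.add (PySem.Set.add sk u) v ↔ x ∈ sk ∨ x = u ∨ x = v := by
    intro x; simp [PySem.Set.mem_add]; tauto
  by_cases hqv : q = v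
  · subst hqv
    rw [PySem.Dict.get?_insert_self]
    constructor
    · intro h
      exact Or.inl ⟨by injection h with h; exact h.symm, (hmem q).mpr (Or.inr (Or.inr rfl))⟩
    · rintro (⟨hk, _⟩ | ⟨s, hs, hq, hne⟩)
      · rw [hk]
      · have := (hcoh q k').mpr ⟨s, hs, hq⟩
        rcases hgv with h | h <;> rw [this] at h
        · cases h
        · exact absurd (by injection h) hne
  · rw [PySem.Dict.get?_insert_of_ne _ _ hqv]
    by_cases hqu : q = u
    · subst hqu
      rw [PySem.Dict.get?_insert_self]
      constructor
      · intro h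
        exact Or.inl ⟨by injection h with h; exact h.symm, (hmem q).mpr (Or.inr (Or.inl rfl))⟩
      · rintro (⟨hk, _⟩ | ⟨s, hs, hq, hne⟩)
        · rw [hk]
        · have := (hcoh q k').mpr ⟨s, hs, hq⟩
          rcases hgu with h | h <;> rw [this] at h
          · cases h
          · exact absurd (by injection h) hne
    · rw [PySem.Dict.get?_insert_of_ne _ _ hqu]
      rw [hcoh q k']
      constructor
      · rintro ⟨s, hs, hq⟩
        by_cases hkk : k' = k
        · subst hkk
          have : s = sk := keyfun hnd hs hksk
          exact Or.inl ⟨rfl, (hmem q).mpr (Or.inl (this ▸ hq))⟩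
        · exact Or.inr ⟨s, hs, hq, hkk⟩
      · rintro (⟨hk, hq⟩ | ⟨s, hs, hq, _⟩)
        · subst hk
          rcases (hmem q).mp hq with h | h | h
          · exact ⟨sk, hksk, h⟩
          · exact absurd h hqu
          · exact absurd h hqv
        · exact ⟨s, hs, hq⟩

theorem coh_merge {label : PySem.Dict Pt Int} {items : List (Int × Net)} {k m : Int} {sk sm : Net}
    (hcoh : Coh label items) (hnd : (items.map Prod.fst).Nodup)
    (hk : (k, sk) ∈ items) (hm : (m, sm) ∈ items) (hne : k ≠ m) :
    Coh (sm.foldl (fun lb q => lb.insert q k) label)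
      ((setAt k (PySem.Set.update sk sm) items).filter (fun p => !(p.1 == m))) := by
  intro q k'
  rw [get?_foldl_insert]
  have hrhs : (∃ s, (k', s) ∈ (setAt k (PySem.Set.update sk sm) items).filter (fun p => !(p.1 == m)) ∧ q ∈ s)
      ↔ (k' = k ∧ (q ∈ sk ∨ q ∈ sm)) ∨ (∃ s, (k', s) ∈ items ∧ q ∈ s ∧ k' ≠ k ∧ k' ≠ m) := by
    constructor
    · rintro ⟨s, hs, hq⟩
      obtain ⟨hs1, hs2⟩ := List.mem_filter.mp hs
      have hs2' : k' ≠ m := by simpa using hs2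
      rcases (mem_setAt hk _ _ _).mp hs1 with ⟨h1, h2⟩ | ⟨h1, h2⟩
      · exact Or.inl ⟨h1, (PySem.Set.mem_update sk sm q).mp (h2 ▸ hq)⟩
      · exact Or.inr ⟨s, h1, hq, h2, hs2'⟩
    · rintro (⟨h1, h2⟩ | ⟨s, h1, h2, h3, h4⟩)
      · refine ⟨_, List.mem_filter.mpr ⟨(mem_setAt hk _ _ _).mpr (Or.inl ⟨h1, rfl⟩), by simpa using (h1 ▸ hne)⟩,
          (PySem.Set.mem_update sk sm q).mpr h2⟩
      · exact ⟨s, List.mem_filter.mpr ⟨(mem_setAt hk _ _ _).mpr (Or.inr ⟨h1, h3⟩), by simpa using h4⟩, h2⟩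
  rw [hrhs]
  by_cases hqsm : q ∈ sm
  · rw [if_pos hqsm]
    constructor
    · intro h
      exact Or.inl ⟨by injection h with h; exact h.symm, Or.inr hqsm⟩
    · rintro (⟨h1, _⟩ | ⟨s, h1, h2, h3, h4⟩)
      · rw [h1]
      · have h5 := (hcoh q k').mpr ⟨s, h1, h2⟩
        have h6 := (hcoh q m).mpr ⟨sm, hm, hqsm⟩
        rw [h5] at h6
        exact absurd (by injection h6) h4
  · rw [if_neg hqsm]
    rw [hcoh q k']
    constructor
    · rintro ⟨s, hs, hq⟩
      by_cases hkk : k' = k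
      · subst hkk
        exact Or.inl ⟨rfl, Or.inl ((keyfun hnd hs hk) ▸ hq)⟩
      · by_cases hkm : k' = m
        · subst hkm
          exact absurd ((keyfun hnd hs hm) ▸ hq) hqsm
        · exact Or.inr ⟨s, hs, hq, hkk, hkm⟩
    · rintro (⟨h1, h2 | h2⟩ | ⟨s, h1, h2, _, _⟩)
      · exact ⟨sk, h1 ▸ hk, h2⟩
      · exact absurd h2 hqsm
      · exact ⟨s, h1, h2⟩

theorem invAB_join {label : PySem.Dict Pt Int} {members : PySem.Dict Int Net} {nxt : Int}
    (conn : Int × Pt × Pt)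
    (hso : (members.items.map Prod.fst).Pairwise (· < ·))
    (hbnd : ∀ kv ∈ members.items, kv.1 < nxt)
    (hcoh : Coh label members.items) (k : Int)
    (hgu : label.get? conn.2.1 = none ∨ label.get? conn.2.1 = some k)
    (hgv : label.get? conn.2.2 = none ∨ label.get? conn.2.2 = some k)
    (hsome : label.get? conn.2.1 = some k ∨ label.get? conn.2.2 = some k) :
    InvAB (stepA (members.items.map Prod.snd) conn)
      (joinAt label members nxt conn.2.1 conn.2.2 k) := by
  have hnd : (members.items.map Prod.fst).Nodup := nodup_of_sorted hso
  set u := conn.2.1 with hu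
  set v := conn.2.2 with hv
  obtain ⟨sk, hksk⟩ : ∃ sk, (k, sk) ∈ members.items := by
    rcases hsome with h | h
    · obtain ⟨s, hs, _⟩ := (hcoh u k).mp h
      exact ⟨s, hs⟩
    · obtain ⟨s, hs, _⟩ := (hcoh v k).mp h
      exact ⟨s, hs⟩
  have hmatch : ∀ kv ∈ members.items, netMatch u v kv.2 = (kv.1 == k) := by
    intro kv hkv
    by_cases hkk : kv.1 = k
    · have h2 : kv.2 = sk := keyfun hnd (show (k, kv.2) ∈ members.items from hkk ▸ hkv) hksk
      have h3 : netMatch u v kv.2 = true := by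
        rw [netMatch_iff, h2]
        rcases hsome with h | h
        · exact Or.inl ((mem_iff_label hcoh hnd hksk u).mpr h)
        · exact Or.inr ((mem_iff_label hcoh hnd hksk v).mpr h)
      rw [h3, hkk]; simp
    · have h3 : netMatch u v kv.2 = false := by
        rw [← Bool.not_eq_true, netMatch_iff]
        rintro (h | h)
        · have h4 := (mem_iff_label hcoh hnd (show (kv.1, kv.2) ∈ members.items from hkv) u).mp h
          rcases hgu with h5 | h5 <;> rw [h4] at h5
          · cases h5
          · exact hkk (by injection h5)
        · have h4 := (mem_iff_label hcoh hnd (show (kv.1, kv.2) ∈ members.items from hkv) v).mp h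
          rcases hgv with h5 | h5 <;> rw [h4] at h5
          · cases h5
          · exact hkk (by injection h5)
      rw [h3]; symm; simpa using hkk
  have hfil : members.items.filter (fun kv => netMatch u v kv.2) = [(k, sk)] :=
    filter_single hnd hksk hmatch
  have hfl : (members.items.map Prod.snd).filter (netMatch u v) = [sk] := by
    rw [List.filter_map]
    rw [show List.filter (netMatch u v ∘ Prod.snd) members.items
        = members.items.filter (fun kv => netMatch u v kv.2) from rfl, hfil]
    rfl
  have hA : stepA (members.items.map Prod.snd) conn =
      (setAt k (PySem.Set.add (PySem.Set.add sk u) v) members.items).map Prod.snd := by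
    rw [stepA_one hfl]
    exact updFirst_setAt hnd hksk hmatch
  have hB : (joinAt label members nxt u v k).2.1.items =
      setAt k (PySem.Set.add (PySem.Set.add sk u) v) members.items := by
    unfold joinAt
    exact items_modify_present hnd hksk _ _
  refine ⟨by rw [hA, hB], ?_, ?_, ?_⟩
  · rw [hB, keys_setAt]; exact hso
  · intro kv hkv
    rw [hB] at hkv
    rcases (mem_setAt hksk _ kv.1 kv.2).mp (by simpa using hkv) with ⟨h1, _⟩ | ⟨h1, _⟩
    · rw [h1]; exact hbnd (k, sk) hksk
    · exact hbnd _ h1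
  · rw [hB]
    exact coh_join hcoh hnd hksk hgu hgv

theorem invAB_merge {label : PySem.Dict Pt Int} {members : PySem.Dict Int Net} {nxt : Int}
    (conn : Int × Pt × Pt)
    (hso : (members.items.map Prod.fst).Pairwise (· < ·))
    (hbnd : ∀ kv ∈ members.items, kv.1 < nxt)
    (hcoh : Coh label members.items) (k m : Int) (hkm : k < m)
    (horient : (label.get? conn.2.1 = some k ∧ label.get? conn.2.2 = some m) ∨
               (label.get? conn.2.1 = some m ∧ label.get? conn.2.2 = some k)) :
    InvAB (stepA (members.items.map Prod.snd) conn)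
      (mergeAt label members nxt k m) := by
  have hnd : (members.items.map Prod.fst).Nodup := nodup_of_sorted hso
  set u := conn.2.1 with hu
  set v := conn.2.2 with hv
  have hgk : label.get? u = some k ∨ label.get? v = some k := by
    rcases horient with ⟨h1, _⟩ | ⟨_, h2⟩
    · exact Or.inl h1
    · exact Or.inr h2
  have hgm : label.get? u = some m ∨ label.get? v = some m := by
    rcases horient with ⟨_, h2⟩ | ⟨h1, _⟩
    · exact Or.inr h2
    · exact Or.inl h1
  obtain ⟨sk, hksk⟩ : ∃ sk, (k, sk) ∈ members.items := by
    rcases hgk with h | h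
    · obtain ⟨s, hs, _⟩ := (hcoh u k).mp h; exact ⟨s, hs⟩
    · obtain ⟨s, hs, _⟩ := (hcoh v k).mp h; exact ⟨s, hs⟩
  obtain ⟨sm, hmsm⟩ : ∃ sm, (m, sm) ∈ members.items := by
    rcases hgm with h | h
    · obtain ⟨s, hs, _⟩ := (hcoh u m).mp h; exact ⟨s, hs⟩
    · obtain ⟨s, hs, _⟩ := (hcoh v m).mp h; exact ⟨s, hs⟩
  have hmatch : ∀ kv ∈ members.items, netMatch u v kv.2 = (kv.1 == k || kv.1 == m) := by
    intro kv hkv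
    by_cases hkk : kv.1 = k
    · have h2 : kv.2 = sk := keyfun hnd (show (k, kv.2) ∈ members.items from hkk ▸ hkv) hksk
      have h3 : netMatch u v kv.2 = true := by
        rw [netMatch_iff, h2]
        rcases hgk with h | h
        · exact Or.inl ((mem_iff_label hcoh hnd hksk u).mpr h)
        · exact Or.inr ((mem_iff_label hcoh hnd hksk v).mpr h)
      rw [h3, hkk]; simp
    · by_cases hkm' : kv.1 = m
      · have h2 : kv.2 = sm := keyfun hnd (show (m, kv.2) ∈ members.items from hkm' ▸ hkv) hmsm
        have h3 : netMatch u v kv.2 = true := by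
          rw [netMatch_iff, h2]
          rcases hgm with h | h
          · exact Or.inl ((mem_iff_label hcoh hnd hmsm u).mpr h)
          · exact Or.inr ((mem_iff_label hcoh hnd hmsm v).mpr h)
        rw [h3, hkm']; simp
      · have h3 : netMatch u v kv.2 = false := by
          rw [← Bool.not_eq_true, netMatch_iff]
          have hul : label.get? u = some k ∨ label.get? u = some m := by
            rcases horient with ⟨h1, _⟩ | ⟨h1, _⟩
            · exact Or.inl h1
            · exact Or.inr h1
          have hvl : label.get? v = some k ∨ label.get? v = some m := by
            rcases horient with ⟨_, h1⟩ | ⟨_, h1⟩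
            · exact Or.inr h1
            · exact Or.inl h1
          rintro (h | h)
          · have h4 := (mem_iff_label hcoh hnd (show (kv.1, kv.2) ∈ members.items from hkv) u).mp h
            rcases hul with h5 | h5 <;> rw [h4] at h5
            · exact hkk (by injection h5)
            · exact hkm' (by injection h5)
          · have h4 := (mem_iff_label hcoh hnd (show (kv.1, kv.2) ∈ members.items from hkv) v).mp h
            rcases hvl with h5 | h5 <;> rw [h4] at h5
            · exact hkk (by injection h5)
            · exact hkm' (by injection h5)
        rw [h3]; symm
        simp [hkk, hkm']
  have hfil : members.items.filter (fun kv => netMatch u v kv.2) = [(k, sk), (m, sm)] :=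
    filter_pair hso hksk hmsm hkm hmatch
  have hfl : (members.items.map Prod.snd).filter (netMatch u v) = [sk, sm] := by
    rw [List.filter_map]
    rw [show List.filter (netMatch u v ∘ Prod.snd) members.items
        = members.items.filter (fun kv => netMatch u v kv.2) from rfl, hfil]
    rfl
  have hgetm : members.get? m = some sm := by
    simp [PySem.Dict.get?, find?_of_mem hnd hmsm]
  have heq : ∀ kv ∈ members.items, PySem.Set.equal kv.2 sm = true → kv.1 = m := by
    obtain ⟨w, hw⟩ : ∃ w, label.get? w = some m := by
      rcases hgm with h | h
      · exact ⟨u, h⟩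
      · exact ⟨v, h⟩
    have hwsm : w ∈ sm := (mem_iff_label hcoh hnd hmsm w).mpr hw
    intro kv hkv hkeq
    have hwin : w ∈ kv.2 := ((PySem.Set.equal_iff kv.2 sm).mp hkeq w).mpr hwsm
    have h4 := (mem_iff_label hcoh hnd (show (kv.1, kv.2) ∈ members.items from hkv) w).mp hwin
    rw [hw] at h4
    injection h4 with h4'
    exact h4'.symm
  have hrem : removeSetEq sm (members.items.map Prod.snd) =
      (members.items.filter (fun p => !(p.1 == m))).map Prod.snd :=
    removeSetEq_erase hnd hmsm heq
  have hndf : ((members.items.filter (fun p => !(p.1 == m))).map Prod.fst).Nodup :=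
    hnd.sublist (List.filter_sublist.map Prod.fst)
  have hkf : (k, sk) ∈ members.items.filter (fun p => !(p.1 == m)) :=
    List.mem_filter.mpr ⟨hksk, by simpa using hkm.ne⟩
  have hmatchf : ∀ kv ∈ members.items.filter (fun p => !(p.1 == m)),
      netMatch u v kv.2 = (kv.1 == k) := by
    intro kv hkv
    obtain ⟨h1, h2⟩ := List.mem_filter.mp hkv
    rw [hmatch kv h1, show (kv.1 == m) = false by simpa using h2, Bool.or_false]
  have hA : stepA (members.items.map Prod.snd) conn =
      (setAt k (PySem.Set.update sk sm) (members.items.filter (fun p => !(p.1 == m)))).map Prod.snd := by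
    rw [stepA_two hfl, hrem]
    exact updFirst_setAt hndf hkf hmatchf
  have hB : (mergeAt label members nxt k m).2.1.items =
      (setAt k (PySem.Set.update sk sm) members.items).filter (fun p => !(p.1 == m)) := by
    unfold mergeAt
    simp only [hgetm, Option.getD_some]
    rw [items_erase, items_modify_present hnd hksk]
  refine ⟨?_, ?_, ?_, ?_⟩
  · rw [hA, hB, setAt_filter_comm]
  · rw [hB, setAt_filter_comm, keys_setAt]
    exact hso.sublist (List.filter_sublist.map Prod.fst)
  · intro kv hkv
    rw [hB, setAt_filter_comm] at hkv
    rcases (mem_setAt hkf _ kv.1 kv.2).mp (by simpa using hkv) with ⟨h1, _⟩ | ⟨h1, _⟩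
    · rw [h1]; exact hbnd (k, sk) hksk
    · exact hbnd _ (List.mem_filter.mp h1).1
  · have hc := coh_merge hcoh hnd hksk hmsm hkm.ne
    unfold mergeAt
    simp only [hgetm, Option.getD_some]
    rw [items_erase, items_modify_present hnd hksk]
    exact hc

theorem inv_step {networks : List Net} {st : BSt} (hinv : InvAB networks st)
    (conn : Int × Pt × Pt) : InvAB (stepA networks conn) (stepB st conn) := by
  obtain ⟨label, members, nxt⟩ := st
  obtain ⟨d, u, v⟩ := conn
  obtain ⟨hval, hso, hbnd, hcoh⟩ := hinv
  have hnd : (members.items.map Prod.fst).Nodup := nodup_of_sorted hso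
  replace hso : (members.items.map Prod.fst).Pairwise (· < ·) := hso
  replace hbnd : ∀ kv ∈ members.items, kv.1 < nxt := hbnd
  replace hcoh : Coh label members.items := hcoh
  subst hval
  rcases hgu : label.get? u with _ | a <;> rcases hgv : label.get? v with _ | b
  · -- both endpoints unseen: fresh network / fresh component
    have hB : stepB (label, members, nxt) (d, u, v) =
        ((label.insert u nxt).insert v nxt,
         members.insert nxt (PySem.Set.add (PySem.Set.add PySem.Set.empty u) v),
         nxt + 1) := by
      simp [stepB, hgu, hgv]
    have hfe : members.items.filter (fun kv => netMatch u v kv.2) = [] := by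
      rw [List.filter_eq_nil_iff]
      intro kv hkv h
      rcases (netMatch_iff u v kv.2).mp h with h' | h'
      · have h4 := (mem_iff_label hcoh hnd (show (kv.1, kv.2) ∈ members.items from hkv) u).mp h'
        rw [hgu] at h4; cases h4
      · have h4 := (mem_iff_label hcoh hnd (show (kv.1, kv.2) ∈ members.items from hkv) v).mp h'
        rw [hgv] at h4; cases h4
    have hfl : (members.items.map Prod.snd).filter (netMatch u v) = [] := by
      rw [List.filter_map]
      rw [show List.filter (netMatch u v ∘ Prod.snd) members.items
          = members.items.filter (fun kv => netMatch u v kv.2) from rfl, hfe]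
      rfl
    have hfresh : ∀ kv ∈ members.items, kv.1 ≠ nxt := fun kv hkv => ne_of_lt (hbnd kv hkv)
    have hBi : (members.insert nxt (PySem.Set.add (PySem.Set.add PySem.Set.empty u) v)).items =
        members.items ++ [(nxt, PySem.Set.add (PySem.Set.add PySem.Set.empty u) v)] :=
      items_insert_fresh _ _ _ hfresh
    rw [hB, show stepA (members.items.map Prod.snd) (d, u, v) =
      members.items.map Prod.snd ++ [PySem.Set.add (PySem.Set.add PySem.Set.empty u) v] from stepA_zero hfl]
    refine ⟨?_, ?_, ?_, ?_⟩
    · rw [hBi]; simp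
    · rw [hBi]
      simp only [List.map_append]
      rw [List.pairwise_append]
      refine ⟨hso, by simp, ?_⟩
      intro x hx y hy
      simp only [List.map_cons, List.map_nil, List.mem_singleton] at hy
      subst hy
      obtain ⟨kv, hkv, rfl⟩ := List.mem_map.mp hx
      exact hbnd kv hkv
    · intro kv hkv
      rw [hBi] at hkv
      rcases List.mem_append.mp hkv with h | h
      · have h5 := hbnd kv h
        show kv.1 < nxt + 1
        omega
      · simp only [List.mem_singleton] at h
        rw [h]
        show nxt < nxt + 1
        omega
    · rw [hBi]
      exact coh_new hcoh hgu hgv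
  · have hB : stepB (label, members, nxt) (d, u, v) = joinAt label members nxt u v b := by
      simp [stepB, hgu, hgv]
    rw [hB]
    exact invAB_join (d, u, v) hso hbnd hcoh b (Or.inl hgu) (Or.inr hgv) (Or.inr hgv)
  · have hB : stepB (label, members, nxt) (d, u, v) = joinAt label members nxt u v a := by
      simp [stepB, hgu, hgv]
    rw [hB]
    exact invAB_join (d, u, v) hso hbnd hcoh a (Or.inr hgu) (Or.inl hgv) (Or.inl hgu)
  · by_cases hab : a = b
    · have hB : stepB (label, members, nxt) (d, u, v) = joinAt label members nxt u v a := by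
        simp [stepB, hgu, hgv, hab]
      rw [hB]
      exact invAB_join (d, u, v) hso hbnd hcoh a (Or.inr hgu) (Or.inr (hab ▸ hgv)) (Or.inl hgu)
    · have hB : stepB (label, members, nxt) (d, u, v) = mergeAt label members nxt (min a b) (max a b) := by
        simp [stepB, hgu, hgv, hab]
      rw [hB]
      by_cases hlt : a < b
      · rw [min_eq_left hlt.le, max_eq_right hlt.le]
        exact invAB_merge (d, u, v) hso hbnd hcoh a b hlt (Or.inl ⟨hgu, hgv⟩)
      · have hlt' : b < a := by
          rcases lt_or_gt_of_ne (hab : a ≠ b) with h | h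
          · exact absurd h hlt
          · exact h
        rw [min_eq_right hlt'.le, max_eq_left hlt'.le]
        exact invAB_merge (d, u, v) hso hbnd hcoh b a hlt' (Or.inr ⟨hgu, hgv⟩)

theorem inv_fold (es : List (Int × Pt × Pt)) {networks : List Net} {st : BSt}
    (hinv : InvAB networks st) : InvAB (es.foldl stepA networks) (es.foldl stepB st) := by
  induction es generalizing networks st with
  | nil => exact hinv
  | cons c t ih => exact ih (inv_step hinv c)

-- ===== VERDICT (by name: the statement is the Claim_ definition above) =====
theorem part1_spec : Claim_equal_part1 := by
  intro data size _ _
  unfold Spec_part1 part1 part1_alt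
  have h0 : InvAB ([] : List Net) ((PySem.Dict.empty, PySem.Dict.empty, 0) : BSt) := by
    refine ⟨rfl, by simp [PySem.Dict.empty], by simp [PySem.Dict.empty], ?_⟩
    intro q k
    simp [PySem.Dict.get?, PySem.Dict.empty]
  have h := (inv_fold (pickedConns data size) h0).1
  simp only [PySem.Dict.values, h]
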